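-- pv_equiv track=rewrite | github.com/lagsip/yastn-experiments | src/assets/tn/mps/_generator_class.py | gen_tuple_list
-- ===== SOURCE A (Python) =====
-- def gen_tuple_list(el_list, dims):
--
--     tuples = []
--
--     for i in range(dims):
--         if tuples:
--             tuples_temp = tuples.copy()
--             tuples = []
--             for el in el_list:
--                 for tup in tuples_temp:
--                     tuples += [tup + (el,)]
--             tuples_temp = []
--
--         else:
--             for el in el_list:
--                 tuples += [(el,)]
--
--     return tuples
-- ===== SOURCE B (Python) =====
-- def gen_tuple_list(el_list, dims):
--     if dims <= 0:
--         return []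
--
--     def combine(ta, tb):
--         # all tuples lo + hi, with the low (fast-varying) part from ta
--         return [lo + hi for hi in tb for lo in ta]
--
--     base = [(e,) for e in el_list]   # tuples of length 1
--     acc = [()]                       # tuples of length 0
--     d = dims
--     while d > 0:                     # exponentiation by squaring on the dimension count
--         if d % 2 == 1:
--             acc = combine(base, acc)
--         d //= 2
--         if d > 0:
--             base = combine(base, base)
--     return acc
-- ===== Notes on version B (the rewrite author's own statement) =====
-- stated objective: alternative
-- what changed: Replaces A's one-dimension-at-a-time rebuild of the whole tuple list (dims sequential passes) with exponentiation by squaring on the dimension count: O(log dims) combine steps that splice a low-part block with a high-part block, reproducing A's exact order (position 0 varies fastest).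
import Mathlib
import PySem

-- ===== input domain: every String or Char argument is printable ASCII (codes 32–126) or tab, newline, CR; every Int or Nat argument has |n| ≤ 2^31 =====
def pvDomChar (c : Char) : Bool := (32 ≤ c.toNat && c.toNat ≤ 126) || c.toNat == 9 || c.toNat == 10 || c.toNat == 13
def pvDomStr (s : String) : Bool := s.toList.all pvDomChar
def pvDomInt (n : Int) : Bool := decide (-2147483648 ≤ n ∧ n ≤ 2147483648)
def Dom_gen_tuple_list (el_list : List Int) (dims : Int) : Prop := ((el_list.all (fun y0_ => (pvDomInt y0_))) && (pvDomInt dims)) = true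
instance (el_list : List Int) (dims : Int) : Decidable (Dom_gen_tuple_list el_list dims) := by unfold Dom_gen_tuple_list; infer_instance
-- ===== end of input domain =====

-- B replaces A's one-dimension-at-a-time rebuild of the tuple list by exponentiation by
-- squaring on the dimension count (alternative algorithm, same output order).


-- ===== PORT A =====
-- literal transliteration of A: dims iterations, each rebuilding `tuples` from the previous list
def gen_tuple_list (el_list : List Int) (dims : Int) : List (List Int) :=
  (PySem.List.pyRange 0 dims 1).foldl
    (fun tuples _ =>
      if tuples ≠ [] then
        -- tuples_temp = tuples.copy(); tuples = []; nested loops appending tup + (el,)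
        el_list.foldl
          (fun acc el => tuples.foldl (fun acc2 tup => acc2 ++ [tup ++ [el]]) acc) []
      else
        el_list.foldl (fun acc el => acc ++ [[el]]) tuples)
    []

-- ===== PORT B =====
-- combine(ta, tb) = [lo + hi for hi in tb for lo in ta]
def combineB (ta tb : List (List Int)) : List (List Int) :=
  tb.flatMap fun hi => ta.map fun lo => lo ++ hi

-- the while-loop of Source B: acc/base updates, then d //= 2, squaring only while d > 0
def binloopB (base acc : List (List Int)) (d : Nat) : List (List Int) :=
  if h : d = 0 then acc
  else
    binloopB (if 0 < d / 2 then combineB base base else base)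
             (if d % 2 = 1 then combineB base acc else acc)
             (d / 2)
  termination_by d
  decreasing_by exact Nat.div_lt_self (Nat.pos_of_ne_zero h) one_lt_two

def gen_tuple_list_alt (el_list : List Int) (dims : Int) : List (List Int) :=
  if dims ≤ 0 then []
  else binloopB (el_list.map fun e => [e]) [[]] dims.toNat

-- ===== PRECONDITION & SPEC =====
def Spec_gen_tuple_list (el_list : List Int) (dims : Int) (out : List (List Int)) : Prop := out = gen_tuple_list_alt el_list dims
instance (el_list : List Int) (dims : Int) (out : List (List Int)) : Decidable (Spec_gen_tuple_list el_list dims out) := by unfold Spec_gen_tuple_list; infer_instance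

-- ===== CLAIM (what is proved, stated in full; the proofs are below) =====
def Claim_equal_gen_tuple_list : Prop := ∀ (el_list : List Int) (dims : Int), Dom_gen_tuple_list el_list dims → Spec_gen_tuple_list el_list dims (gen_tuple_list el_list dims)

-- ===== LEMMAS AND PROOFS =====

-- the mathematical product: Tprod el k = all length-k tuples, position 0 varying fastest
def Tprod (el : List Int) : Nat → List (List Int)
  | 0 => [[]]
  | (k+1) => el.flatMap fun e => (Tprod el k).map (· ++ [e])

theorem Tprod_nil (k : Nat) : Tprod [] (k+1) = [] := by simp [Tprod]

theorem Tprod_ne_nil (el : List Int) (hel : el ≠ []) : ∀ k, Tprod el k ≠ [] := by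
  intro k
  induction k with
  | zero => simp [Tprod]
  | succ k ih =>
    obtain ⟨e, rest, rfl⟩ := List.exists_cons_of_ne_nil hel
    intro h
    rw [Tprod, List.flatMap_cons] at h
    rcases List.append_eq_nil_iff.mp h with ⟨h1, -⟩
    exact ih (List.map_eq_nil_iff.mp h1)

-- one iteration of A's loop body
def stepA (el : List Int) (tuples : List (List Int)) : List (List Int) :=
  if tuples ≠ [] then
    el.foldl (fun acc e => tuples.foldl (fun acc2 tup => acc2 ++ [tup ++ [e]]) acc) []
  else
    el.foldl (fun acc e => acc ++ [[e]]) tuples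

theorem stepA_nil (el : List Int) : stepA el [] = Tprod el 1 := by
  simp [stepA, Tprod, List.flatMap]

theorem stepA_Tprod (el : List Int) (k : Nat) : stepA el (Tprod el k.succ) = Tprod el (k+2) := by
  by_cases hel : el = []
  · subst hel; simp [stepA, Tprod_nil]
  · have hne := Tprod_ne_nil el hel (k+1)
    have hbody : ∀ (acc : List (List Int)) (e : Int),
        (Tprod el (k+1)).foldl (fun acc2 tup => acc2 ++ [tup ++ [e]]) acc
          = acc ++ (Tprod el (k+1)).map (· ++ [e]) := fun acc e =>
      PySem.List.foldl_append_singleton_eq_map (· ++ [e]) (Tprod el (k+1)) acc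
    simp only [stepA, if_pos (by simpa using hne)]
    calc el.foldl (fun acc e => (Tprod el (k+1)).foldl (fun acc2 tup => acc2 ++ [tup ++ [e]]) acc) []
        = el.foldl (fun acc e => acc ++ (Tprod el (k+1)).map (· ++ [e])) [] := by
          exact PySem.List.foldl_congr_mem el _ _ [] (fun acc e _ => hbody acc e)
      _ = [] ++ el.flatMap (fun e => (Tprod el (k+1)).map (· ++ [e])) :=
          PySem.List.foldl_append_eq_flatMap _ el []
      _ = Tprod el (k+2) := by simp [Tprod]

theorem iter_stepA (el : List Int) (k : Nat) : (stepA el)^[k+1] [] = Tprod el (k+1) := by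
  induction k with
  | zero => simpa using stepA_nil el
  | succ k ih =>
    rw [Function.iterate_succ_apply', ih]
    exact stepA_Tprod el k

-- A's port computes Tprod (for positive dims)
theorem portA_eq (el : List Int) (d : Int) :
    gen_tuple_list el d = if d ≤ 0 then [] else Tprod el d.toNat := by
  by_cases hd : d ≤ 0
  · unfold gen_tuple_list
    rw [PySem.List.pyRange_one_eq_nil (by omega)]
    simp [hd]
  · rw [if_neg hd]
    have hiter : gen_tuple_list el d = (stepA el)^[(PySem.List.pyRange 0 d 1).length] [] :=
      List.foldl_const (stepA el) [] _
    rw [hiter, PySem.List.length_pyRange_one, show d - 0 = d from by ring]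
    obtain ⟨k, hk⟩ : ∃ k, d.toNat = k + 1 := ⟨d.toNat - 1, by omega⟩
    rw [hk]
    exact iter_stepA el k

-- combining the length-a products (low part) with the length-b products (high part)
theorem combineB_Tprod (el : List Int) (a b : Nat) :
    combineB (Tprod el a) (Tprod el b) = Tprod el (a + b) := by
  induction b with
  | zero => simp [combineB, Tprod]
  | succ b ih =>
    show combineB (Tprod el a) (Tprod el (b+1)) = Tprod el (a + b + 1)
    rw [Tprod, Tprod, ← ih]
    simp [combineB, List.map_flatMap, List.flatMap_map, List.map_map, List.flatMap_assoc,
      Function.comp_def, List.append_assoc]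

-- the binexp loop invariant: from base = Tprod c and acc = Tprod a it computes Tprod (a + c*d)
theorem binloopB_Tprod (el : List Int) : ∀ (d c a : Nat),
    binloopB (Tprod el c) (Tprod el a) d = Tprod el (a + c * d) := by
  intro d
  induction d using Nat.strong_induction_on with
  | _ d ih =>
    intro c a
    by_cases hd : d = 0
    · subst hd; simp [binloopB]
    · rw [binloopB, dif_neg hd]
      have hlt : d / 2 < d := Nat.div_lt_self (Nat.pos_of_ne_zero hd) one_lt_two
      by_cases h2 : 0 < d / 2
      · rw [if_pos h2, combineB_Tprod]
        by_cases hodd : d % 2 = 1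
        · rw [if_pos hodd, combineB_Tprod, ih _ hlt]
          congr 1
          conv_rhs => rw [← Nat.div_add_mod d 2]
          rw [hodd]; ring
        · have h0 : d % 2 = 0 := by omega
          rw [if_neg hodd, ih _ hlt]
          congr 1
          conv_rhs => rw [← Nat.div_add_mod d 2]
          rw [h0]; ring
      · have hd1 : d = 1 := by omega
        subst hd1
        simp [binloopB, combineB_Tprod, Nat.add_comm]

-- B's port computes Tprod (for positive dims)
theorem portB_eq (el : List Int) (d : Int) :
    gen_tuple_list_alt el d = if d ≤ 0 then [] else Tprod el d.toNat := by
  unfold gen_tuple_list_alt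
  by_cases hd : d ≤ 0
  · simp [hd]
  · rw [if_neg hd, if_neg hd]
    have hbase : (el.map fun e => [e]) = Tprod el 1 := by
      simp only [Tprod]
      induction el with
      | nil => rfl
      | cons e t iht => simp only [List.map_cons, List.flatMap_cons, iht]; rfl
    have hacc : ([[]] : List (List Int)) = Tprod el 0 := by simp [Tprod]
    rw [hbase, hacc, binloopB_Tprod]
    congr 1; omega

-- ===== VERDICT (by name: the statement is the Claim_ definition above) =====
theorem gen_tuple_list_spec : Claim_equal_gen_tuple_list := by
  intro el d _
  unfold Spec_gen_tuple_list
  rw [portA_eq, portB_eq]
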